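-- pv_equiv track=rewrite | github.com/vu-aml/conserved-feature | src/feature_space_retraining/FSR.py | str2vec
-- ===== SOURCE A (Python) =====
-- def str2vec(lib_str):
--     vec = [0]*961
--     on = 0
--     tmp = ''
--     for i in range(0, len(lib_str)):
--         if lib_str[i] == ':':
--             on = 0
--             vec[int(tmp)-1] = 1
--             tmp = ''
--         if on == 1:
--             tmp = tmp + lib_str[i]
--         if lib_str[i] == ' ':
--             on = 1
--     return vec
-- ===== SOURCE B (Python) =====
-- def str2vec(lib_str):
--     vec = [0]*961
--     for piece in lib_str.split(':')[:-1]: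
--         sp = piece.find(' ')
--         tok = piece[sp+1:] if sp != -1 else ''
--         vec[int(tok)-1] = 1
--     return vec
-- ===== Notes on version B (the rewrite author's own statement) =====
-- stated objective: simpler
-- what changed: Replaces the per-character on/tmp state machine with a segment-based parse: split on ':', and for each piece except the last take the substring after its first space as the index token.
import Mathlib
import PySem

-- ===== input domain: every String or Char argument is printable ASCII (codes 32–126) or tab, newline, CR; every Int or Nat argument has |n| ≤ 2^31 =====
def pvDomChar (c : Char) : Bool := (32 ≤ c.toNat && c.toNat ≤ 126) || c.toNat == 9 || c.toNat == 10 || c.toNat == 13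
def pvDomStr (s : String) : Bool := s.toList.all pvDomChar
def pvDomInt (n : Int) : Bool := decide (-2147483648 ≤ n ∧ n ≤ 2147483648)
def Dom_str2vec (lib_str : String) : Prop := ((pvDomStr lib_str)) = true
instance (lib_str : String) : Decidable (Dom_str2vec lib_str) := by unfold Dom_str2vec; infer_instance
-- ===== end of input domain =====

-- B replaces A's per-character on/tmp state machine by a segment-based parse
-- (split on ':', take each piece's text after its first space as the token); objective: simpler.

-- ===== PORT A =====
-- one iteration of A's for-loop: the three ifs in source order;
-- 'none' models the ValueError of int('') / bad token and the IndexError of vec[int(tmp)-1]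
def stepA (st : List Int × Int × List Char) (c : Char) :
    Option (List Int × Int × List Char) :=
  (if c = ':' then
     match PySem.Int.ofChars? st.2.2 with            -- int(tmp)
     | none => none
     | some k =>
       match PySem.List.pySet? st.1 (k - 1) 1 with   -- vec[int(tmp)-1] = 1
       | none => none
       | some vec' => some (vec', 0, [])             -- on = 0; tmp = ''
   else some st).map (fun st' =>
     let tmp' := if st'.2.1 = 1 then st'.2.2 ++ [c] else st'.2.2   -- if on == 1: tmp += c
     let on'  := if c = ' ' then 1 else st'.2.1                    -- if c == ' ': on = 1
     (st'.1, on', tmp'))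

def str2vec (lib_str : String) : List Int :=
  ((lib_str.toList.foldl (fun o c => o.bind (fun st => stepA st c))
      (some (List.replicate 961 0, (0 : Int), ([] : List Char)))).map
    (fun st => st.1)).getD []

-- ===== PORT B =====
-- one piece: token = text after the piece's first space ('' if none), then vec[int(tok)-1] = 1
def stepB (ov : Option (List Int)) (piece : List Char) : Option (List Int) :=
  ov.bind (fun vec =>
    let sp := PySem.Chars.find piece [' ']                                   -- piece.find(' ')
    let tok := if sp ≠ -1 then PySem.Chars.slice piece (some (sp + 1)) none  -- piece[sp+1:]
               else []                                                        -- ''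
    match PySem.Int.ofChars? tok with
    | none => none
    | some k => PySem.List.pySet? vec (k - 1) 1)

def str2vec_alt (lib_str : String) : List Int :=
  let pieces := PySem.List.slice (PySem.Chars.splitOn lib_str.toList [':'])
                  none (some (-1))                   -- lib_str.split(':')[:-1]
  (pieces.foldl stepB (some (List.replicate 961 0))).getD []

-- ===== PRECONDITION & SPEC =====
-- Pre_ excludes exactly the inputs on which A raises: some ':'-piece before the last
-- whose text after its first space is not an int (ValueError) or indexes outside the
-- 961-vector (IndexError).
def Pre_str2vec (lib_str : String) : Prop :=
  ∀ piece ∈ (PySem.Chars.splitOn lib_str.toList [':']).dropLast,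
    ((PySem.Int.ofChars? ((piece.dropWhile (· ≠ ' ')).tail)).any
      (fun k => decide (-961 ≤ k - 1 ∧ k - 1 < 961))) = true
instance (lib_str : String) : Decidable (Pre_str2vec lib_str) := by
  unfold Pre_str2vec; infer_instance
def pvWitness_str2vec : String := "1 2:3 4:5"
def Spec_str2vec (lib_str : String) (out : List Int) : Prop := out = str2vec_alt lib_str
instance (lib_str : String) (out : List Int) : Decidable (Spec_str2vec lib_str out) := by
  unfold Spec_str2vec; infer_instance

-- ===== CLAIM (what is proved, stated in full; the proofs are below) =====
def Claim_equal_str2vec : Prop := ∀ (lib_str : String), Dom_str2vec lib_str → Pre_str2vec lib_str → Spec_str2vec lib_str (str2vec lib_str)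

-- ===== LEMMAS AND PROOFS =====

-- reference single-char split on ':'
def splitAux : List Char → List (List Char)
  | [] => [[]]
  | c :: rest => if c = ':' then [] :: splitAux rest else (splitAux rest).modifyHead (c :: ·)

theorem splitAux_ne_nil (cs : List Char) : splitAux cs ≠ [] := by
  induction cs with
  | nil => simp [splitAux]
  | cons c rest ih =>
    simp only [splitAux]
    split_ifs
    · simp
    · cases h : splitAux rest with
      | nil => exact absurd h ih
      | cons p ps => simp

theorem splitOn_go_eq (cs : List Char) : ∀ (fuel : Nat) (cur : List Char)
    (acc : List (List Char)), cs.length < fuel →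
    PySem.Chars.splitOn.go [':'] fuel cs cur acc
      = acc.reverse ++ (splitAux cs).modifyHead (cur.reverse ++ ·) := by
  induction cs with
  | nil =>
    intro fuel cur acc h
    match fuel, h with
    | fuel + 1, _ => simp [PySem.Chars.splitOn.go, splitAux]
  | cons c rest ih =>
    intro fuel cur acc h
    match fuel, h with
    | fuel + 1, h =>
      simp only [PySem.Chars.splitOn.go]
      by_cases hc : c = ':'
      · have hpre : List.isPrefixOf [':'] (c :: rest) = true := by simp [hc]
        rw [if_pos hpre]
        have hd : List.drop [':'].length (c :: rest) = rest := rfl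
        rw [hd, ih fuel [] (cur.reverse :: acc) (by simpa using Nat.lt_of_succ_lt_succ h)]
        simp [splitAux, hc]
        cases splitAux rest <;> simp [List.modifyHead]
      · have hpre : ¬ (List.isPrefixOf [':'] (c :: rest) = true) := by
          simp [List.isPrefixOf]
          intro h'; exact hc h'.symm
        rw [if_neg hpre]
        rw [ih fuel (c :: cur) acc (by simpa using Nat.lt_of_succ_lt_succ h)]
        simp only [splitAux, if_neg hc]
        congr 1
        cases hs : splitAux rest with
        | nil => exact absurd hs (splitAux_ne_nil rest)
        | cons p ps => simp [List.modifyHead]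

theorem splitOn_eq (cs : List Char) :
    PySem.Chars.splitOn cs [':'] = splitAux cs := by
  show PySem.Chars.splitOn.go [':'] (cs.length + 1) cs [] [] = _
  rw [splitOn_go_eq cs (cs.length + 1) [] [] (Nat.lt_succ_self _)]
  cases hs : splitAux cs with
  | nil => exact absurd hs (splitAux_ne_nil cs)
  | cons p ps => simp [List.modifyHead]

theorem splitAux_no_colon (cs : List Char) (h : ':' ∉ cs) : splitAux cs = [cs] := by
  induction cs with
  | cons c rest ih =>
    have h1 : ¬ c = ':' := by intro h'; exact h (by simp [h'])
    have h2 : ':' ∉ rest := fun hm => h (List.mem_cons_of_mem _ hm)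
    simp [splitAux, h1, ih h2, List.modifyHead]
  | nil => rfl

theorem splitAux_append (p rest : List Char) (h : ':' ∉ p) :
    splitAux (p ++ ':' :: rest) = p :: splitAux rest := by
  induction p with
  | nil => simp [splitAux]
  | cons c q ih =>
    have h1 : ¬ c = ':' := by intro h'; exact h (by simp [h'])
    have h2 : ':' ∉ q := fun hm => h (List.mem_cons_of_mem _ hm)
    simp only [List.cons_append, splitAux, if_neg h1, ih h2, List.modifyHead]

theorem exists_decomp (cs : List Char) (hc : ':' ∈ cs) :
    ∃ p rest, ':' ∉ p ∧ cs = p ++ ':' :: rest := by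
  induction cs with
  | nil => cases hc
  | cons c rest ih =>
    by_cases h : c = ':'
    · exact ⟨[], rest, by simp, by simp [h]⟩
    · have hm : ':' ∈ rest := by
        rcases List.mem_cons.mp hc with h' | h'
        · exact absurd h'.symm h
        · exact h'
      rcases ih hm with ⟨p, r, hp, hr⟩
      refine ⟨c :: p, r, ?_, by simp [hr]⟩
      intro hmem
      rcases List.mem_cons.mp hmem with h' | h'
      · exact h h'.symm
      · exact hp h'

-- A's fold, abbreviated
def foldA (cs : List Char) (o : Option (List Int × Int × List Char)) :
    Option (List Int × Int × List Char) :=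
  cs.foldl (fun o c => o.bind (fun st => stepA st c)) o

theorem foldA_none (cs : List Char) : foldA cs none = none := by
  induction cs with
  | nil => rfl
  | cons c rest ih => simpa [foldA, List.foldl] using ih

theorem foldB_none (ps : List (List Char)) : ps.foldl stepB none = none := by
  induction ps with
  | nil => rfl
  | cons p rest ih => simpa [List.foldl, stepB] using ih

-- once on == 1, every remaining (non-':') char is appended to tmp
theorem foldA_on1 (cs : List Char) (h : ':' ∉ cs) : ∀ (vec : List Int) (tmp : List Char),
    foldA cs (some (vec, 1, tmp)) = some (vec, 1, tmp ++ cs) := by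
  induction cs with
  | nil => intro vec tmp; simp [foldA]
  | cons c rest ih =>
    intro vec tmp
    have h1 : ¬ c = ':' := by intro h'; exact h (by simp [h'])
    have h2 : ':' ∉ rest := fun hm => h (List.mem_cons_of_mem _ hm)
    have hst : stepA (vec, 1, tmp) c = some (vec, 1, tmp ++ [c]) := by
      simp [stepA, h1]
    show foldA rest ((some (vec, 1, tmp)).bind (fun st => stepA st c)) = _
    rw [Option.bind_some, hst, ih h2]
    simp

-- from on == 0, tmp collects exactly the text after the segment's first space
theorem foldA_on0 (cs : List Char) (h : ':' ∉ cs) : ∀ (vec : List Int) (tmp : List Char),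
    foldA cs (some (vec, 0, tmp))
      = some (vec, (if ' ' ∈ cs then 1 else 0), tmp ++ (cs.dropWhile (· ≠ ' ')).tail) := by
  induction cs with
  | nil => intro vec tmp; simp [foldA]
  | cons c rest ih =>
    intro vec tmp
    have h1 : ¬ c = ':' := by intro h'; exact h (by simp [h'])
    have h2 : ':' ∉ rest := fun hm => h (List.mem_cons_of_mem _ hm)
    by_cases hsp : c = ' '
    · have hst : stepA (vec, 0, tmp) c = some (vec, 1, tmp) := by
        simp [stepA, hsp]
      show foldA rest ((some (vec, 0, tmp)).bind (fun st => stepA st c)) = _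
      rw [Option.bind_some, hst, foldA_on1 rest h2]
      simp [hsp, List.dropWhile]
    · have hst : stepA (vec, 0, tmp) c = some (vec, 0, tmp) := by
        simp [stepA, h1, hsp]
      show foldA rest ((some (vec, 0, tmp)).bind (fun st => stepA st c)) = _
      rw [Option.bind_some, hst, ih h2]
      have hm1 : ' ' ∈ c :: rest ↔ ' ' ∈ rest := by
        constructor
        · intro h'
          rcases List.mem_cons.mp h' with h'' | h''
          · exact absurd h''.symm hsp
          · exact h''
        · exact fun h' => List.mem_cons_of_mem _ h'
      have hdw : (c :: rest).dropWhile (· ≠ ' ') = rest.dropWhile (· ≠ ' ') := by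
        have : (fun x => decide (x ≠ ' ')) c = true := by
          simp; intro h'; exact hsp h'
        simp [List.dropWhile, this]
      rw [hdw]
      by_cases hr : ' ' ∈ rest
      · rw [if_pos hr, if_pos (hm1.mpr hr)]
      · rw [if_neg hr, if_neg (fun h' => hr (hm1.mp h'))]

-- first occurrence of ' ' via find.go
theorem find_go_space (l : List Char) : ∀ (k : Nat), PySem.Chars.find.go [' '] l k
    = if ' ' ∈ l then ((k + (l.takeWhile (· ≠ ' ')).length : Nat) : Int) else -1 := by
  induction l with
  | nil => intro k; simp [PySem.Chars.find.go]
  | cons c rest ih =>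
    intro k
    by_cases hc : c = ' '
    · simp [PySem.Chars.find.go, List.isPrefixOf, hc, List.takeWhile]
    · have hpre : ¬ (List.isPrefixOf [' '] (c :: rest) = true) := by
        simp [List.isPrefixOf]
        intro h'; exact hc h'.symm
      have hgo : PySem.Chars.find.go [' '] (c :: rest) k
          = PySem.Chars.find.go [' '] rest (k + 1) := by
        simp only [PySem.Chars.find.go]
        rw [if_neg hpre]
      rw [hgo, ih (k + 1)]
      have hm1 : ' ' ∈ c :: rest ↔ ' ' ∈ rest := by
        constructor
        · intro h'
          rcases List.mem_cons.mp h' with h'' | h''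
          · exact absurd h''.symm hc
          · exact h''
        · exact fun h' => List.mem_cons_of_mem _ h'
      have htw : (c :: rest).takeWhile (· ≠ ' ') = c :: rest.takeWhile (· ≠ ' ') := by
        have : (fun x => decide (x ≠ ' ')) c = true := by
          simp; intro h'; exact hc h'
        simp [List.takeWhile, this]
      rw [htw]
      by_cases hr : ' ' ∈ rest
      · rw [if_pos hr, if_pos (hm1.mpr hr)]
        simp only [List.length_cons]
        push_cast; ring
      · rw [if_neg hr, if_neg (fun h' => hr (hm1.mp h'))]

-- B's token for a colon-free piece is A's accumulated tmp
theorem tok_eq (cs : List Char) :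
    (if PySem.Chars.find cs [' '] ≠ -1 then
        PySem.Chars.slice cs (some (PySem.Chars.find cs [' '] + 1)) none
      else [])
      = (cs.dropWhile (· ≠ ' ')).tail := by
  have hfind : PySem.Chars.find cs [' ']
      = if ' ' ∈ cs then (((cs.takeWhile (· ≠ ' ')).length : Nat) : Int) else -1 := by
    show PySem.Chars.find.go [' '] cs 0 = _
    rw [find_go_space cs 0]; simp
  by_cases hm : ' ' ∈ cs
  · rw [hfind, if_pos hm]
    have hne : (((cs.takeWhile (· ≠ ' ')).length : Nat) : Int) ≠ -1 := by omega
    rw [if_pos hne, PySem.Chars.slice_eq_listSlice]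
    have hcast : (((cs.takeWhile (· ≠ ' ')).length : Nat) : Int) + 1
        = (((cs.takeWhile (· ≠ ' ')).length + 1 : Nat) : Int) := by push_cast; ring
    rw [hcast, PySem.List.slice_from_natCast]
    have hdropn : ∀ (l : List Char), l.drop ((l.takeWhile (· ≠ ' ')).length)
        = l.dropWhile (· ≠ ' ') := by
      intro l
      induction l with
      | nil => rfl
      | cons c rest ih =>
        by_cases hc' : c = ' '
        · simp [hc']
        · simp [hc']
          simpa using ih
    rw [← List.tail_drop, hdropn]
  · rw [hfind, if_neg hm]
    have h0 : ¬ ((-1 : Int) ≠ -1) := by simp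
    rw [if_neg h0]
    have hdw : cs.dropWhile (· ≠ ' ') = [] := by
      rw [List.dropWhile_eq_nil_iff]
      intro x hx
      have : x ≠ ' ' := fun h' => hm (h' ▸ hx)
      simp [this]
    rw [hdw]
    rfl

-- A's flush step at a ':'
theorem stepA_colon (vec : List Int) (onv : Int) (tmp : List Char) :
    stepA (vec, onv, tmp) ':' =
      (match PySem.Int.ofChars? tmp with
       | none => none
       | some k =>
         match PySem.List.pySet? vec (k - 1) 1 with
         | none => none
         | some vec' => some (vec', 0, ([] : List Char))) := by
  simp only [stepA]
  cases hof : PySem.Int.ofChars? tmp with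
  | none => rfl
  | some k =>
    simp only
    cases hset : PySem.List.pySet? vec (k - 1) 1 with
    | none => rfl
    | some vec' => simp

-- main invariant: A's fold over the raw characters equals B's fold over the pieces
theorem main_lemma (cs : List Char) (vec : List Int) :
    (foldA cs (some (vec, 0, []))).map (fun st => st.1)
      = ((splitAux cs).dropLast).foldl stepB (some vec) := by
  induction hn : cs.length using Nat.strong_induction_on generalizing cs vec with
  | _ n ih =>
    by_cases hc : ':' ∈ cs
    · obtain ⟨p, rest, hp, hcs⟩ := exists_decomp cs hc
      subst hcs
      rw [splitAux_append p rest hp]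
      have hfold : foldA (p ++ ':' :: rest) (some (vec, 0, []))
          = foldA rest ((foldA p (some (vec, 0, []))).bind (fun st => stepA st ':')) := by
        simp [foldA, List.foldl_append, List.foldl]
      rw [hfold, foldA_on0 p hp vec []]
      rw [Option.bind_some, stepA_colon]
      have htok : stepB (some vec) p
          = (match PySem.Int.ofChars? ((p.dropWhile (· ≠ ' ')).tail) with
             | none => none
             | some k => PySem.List.pySet? vec (k - 1) 1) := by
        simp only [stepB, Option.bind_some]
        rw [tok_eq p]
      have hdrop : (p :: splitAux rest).dropLast = p :: (splitAux rest).dropLast := by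
        cases hsr : splitAux rest with
        | nil => exact absurd hsr (splitAux_ne_nil rest)
        | cons q qs => simp
      rw [hdrop, List.foldl_cons, htok]
      have hlen : rest.length < n := by
        subst hn; simp; omega
      cases hof : PySem.Int.ofChars? ((p.dropWhile (· ≠ ' ')).tail) with
      | none =>
        simp only [List.nil_append, hof]
        rw [foldA_none, foldB_none]
        rfl
      | some k =>
        simp only [List.nil_append, hof]
        cases hset : PySem.List.pySet? vec (k - 1) 1 with
        | none =>
          rw [foldA_none, foldB_none]
          rfl
        | some vec' =>
          exact ih rest.length hlen rest vec' rfl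
    · rw [splitAux_no_colon cs hc, foldA_on0 cs hc vec []]
      simp

theorem ports_eq (lib_str : String) : str2vec lib_str = str2vec_alt lib_str := by
  show ((foldA lib_str.toList (some (List.replicate 961 0, 0, []))).map (fun st => st.1)).getD []
      = ((PySem.List.slice (PySem.Chars.splitOn lib_str.toList [':']) none
            (some (-1))).foldl stepB (some (List.replicate 961 0))).getD []
  rw [PySem.List.slice_to_neg_one, splitOn_eq, main_lemma]

-- ===== VERDICT (by name: the statement is the Claim_ definition above) =====
theorem str2vec_spec : Claim_equal_str2vec := by
  intro lib_str _ _
  unfold Spec_str2vec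
  exact ports_eq lib_str
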